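-- pv_equiv track=rewrite | github.com/cornell-brg/pymtl3-net | analytical/lat_model.py | _get_express_paths
-- ===== SOURCE A (Python) =====
-- def _get_express_paths( nrouters, skip_factor ):
--   exp_paths = []
--   cur_id  = 0
--   last_id = nrouters-1
--   while cur_id < last_id:
--     next_id = cur_id + skip_factor
--     if next_id <= last_id:
--       # if cur_id not in exp_paths:
--         # exp_paths.insert( -1, cur_id )
--       # if next_id not in exp_paths:
--         # exp_paths.append( next_id )
--       exp_paths.append( ( cur_id, next_id ) )
--     cur_id = next_id - 1
--   return exp_paths
-- ===== SOURCE B (Python) =====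
-- def _get_express_paths(nrouters, skip_factor):
--     if skip_factor < 2:
--         return []
--     last = nrouters - 1
--     step = skip_factor - 1
--     npairs = (last - skip_factor) // step + 1
--     return [(i * step, i * step + skip_factor) for i in range(npairs)]
-- ===== Notes on version B (the rewrite author's own statement) =====
-- stated objective: alternative
-- what changed: Replaces A's stateful while-loop that walks cur_id in strides and tests each candidate against last_id with a closed-form count of pairs ((last-skip)//(skip-1)+1) followed by direct construction of the i-th pair (i*(skip-1), i*(skip-1)+skip) -- no traversal to last_id and no per-element test; B returns [] for skip_factor<2, where A never returns (infinite loop), excluded by Pre_.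
import Mathlib
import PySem

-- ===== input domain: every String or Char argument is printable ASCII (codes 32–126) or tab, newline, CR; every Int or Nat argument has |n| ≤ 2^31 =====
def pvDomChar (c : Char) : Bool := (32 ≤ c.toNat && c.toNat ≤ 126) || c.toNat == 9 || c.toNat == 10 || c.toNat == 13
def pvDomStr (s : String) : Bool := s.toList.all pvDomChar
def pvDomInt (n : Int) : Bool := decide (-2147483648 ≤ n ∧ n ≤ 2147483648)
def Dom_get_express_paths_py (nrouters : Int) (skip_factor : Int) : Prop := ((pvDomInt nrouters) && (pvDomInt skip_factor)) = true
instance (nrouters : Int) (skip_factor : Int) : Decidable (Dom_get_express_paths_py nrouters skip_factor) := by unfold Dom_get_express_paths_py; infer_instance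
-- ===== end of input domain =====

-- B replaces A's stateful while-loop (cur_id striding, per-candidate test against last_id)
-- with a closed-form count of pairs and direct construction of the i-th pair; objective: alternative.

-- ===== PORT A =====
-- A's while-loop, with fuel ((nrouters-1).toNat iterations suffice whenever skip_factor ≥ 2,
-- the only case in which the Python loop terminates with last_id > 0).
def pvLoopA (skip lastId : Int) : Nat → Int → List (Int × Int) → List (Int × Int)
  | 0, _, acc => acc
  | f + 1, cur, acc =>
    if cur < lastId then
      pvLoopA skip lastId f (cur + skip - 1)
        (if cur + skip ≤ lastId then acc ++ [(cur, cur + skip)] else acc)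
    else acc

def get_express_paths_py (nrouters : Int) (skip_factor : Int) : List (Int × Int) :=
  pvLoopA skip_factor (nrouters - 1) (nrouters - 1).toNat 0 []

-- ===== PORT B =====
def get_express_paths_py_alt (nrouters : Int) (skip_factor : Int) : List (Int × Int) :=
  if skip_factor < 2 then []
  else
    (PySem.List.pyRange 0 (PySem.Int.floordiv ((nrouters - 1) - skip_factor) (skip_factor - 1) + 1) 1).map
      (fun i => (i * (skip_factor - 1), i * (skip_factor - 1) + skip_factor))

-- ===== PRECONDITION & SPEC =====
-- Pre_ excludes exactly the inputs where Python A never returns: for skip_factor ≤ 1 and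
-- nrouters ≥ 2 the while-loop's cur_id never increases, so A loops forever.
def Pre_get_express_paths_py (nrouters : Int) (skip_factor : Int) : Prop :=
  nrouters ≤ 1 ∨ 2 ≤ skip_factor
instance (nrouters : Int) (skip_factor : Int) : Decidable (Pre_get_express_paths_py nrouters skip_factor) := by unfold Pre_get_express_paths_py; infer_instance
def pvWitness_get_express_paths_py : Int × Int := (9, 3)

def Spec_get_express_paths_py (nrouters : Int) (skip_factor : Int) (out : List (Int × Int)) : Prop := out = get_express_paths_py_alt nrouters skip_factor
instance (nrouters : Int) (skip_factor : Int) (out : List (Int × Int)) : Decidable (Spec_get_express_paths_py nrouters skip_factor out) := by unfold Spec_get_express_paths_py; infer_instance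

-- ===== CLAIM (what is proved, stated in full; the proofs are below) =====
def Claim_equal_get_express_paths_py : Prop := ∀ (nrouters : Int) (skip_factor : Int), Dom_get_express_paths_py nrouters skip_factor → Pre_get_express_paths_py nrouters skip_factor → Spec_get_express_paths_py nrouters skip_factor (get_express_paths_py nrouters skip_factor)

-- ===== LEMMAS AND PROOFS =====

-- range with a positive step, in cons form
theorem pvRange_pos_cons {a b s : Int} (hs : 0 < s) (hab : a < b) :
    PySem.List.pyRange a b s = a :: PySem.List.pyRange (a + s) b s := by
  rw [PySem.List.pyRange_of_pos _ _ hs, PySem.List.pyRange_of_pos _ _ hs]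
  have h1 : b - a + s - 1 = (b - a - 1) + 1 * s := by ring
  have h2 : (b - a + s - 1) / s = (b - a - 1) / s + 1 := by
    rw [h1, Int.add_mul_ediv_right _ _ (ne_of_gt hs)]
  have hge : 0 ≤ (b - a - 1) / s := Int.ediv_nonneg (by omega) (le_of_lt hs)
  by_cases hc : a + s < b
  · have h3 : b - (a + s) + s - 1 = b - a - 1 := by ring
    rw [if_pos hab, if_pos hc, h3, h2]
    have hT : ((b - a - 1) / s + 1).toNat = ((b - a - 1) / s).toNat + 1 := by omega
    rw [hT, List.range_succ_eq_map, List.map_cons, List.map_map]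
    congr 1
    · simp
    · exact List.map_congr_left (fun k _ => by simp [Function.comp]; ring)
  · have hz : (b - a - 1) / s = 0 := Int.ediv_eq_zero_of_lt (by omega) (by omega)
    rw [if_pos hab, if_neg hc, h2, hz]
    simp

theorem pvRange_pos_nil {a b s : Int} (hs : 0 < s) (hab : b ≤ a) :
    PySem.List.pyRange a b s = [] := by
  rw [PySem.List.pyRange_of_pos _ _ hs, if_neg (by omega)]
  simp

-- A's loop collects exactly the strided candidates that pass the test
theorem pvLoopA_eq (s lastId : Int) (hs : 2 ≤ s) :
    ∀ (f : Nat) (cur : Int) (acc : List (Int × Int)), (lastId - cur).toNat ≤ f →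
      pvLoopA s lastId f cur acc =
        acc ++ ((PySem.List.pyRange cur lastId (s - 1)).filter
            (fun c => decide (c + s ≤ lastId))).map (fun c => (c, c + s)) := by
  intro f
  induction f with
  | zero =>
    intro cur acc hf
    have hle : lastId ≤ cur := by omega
    rw [pvRange_pos_nil (by omega) hle]
    simp [pvLoopA]
  | succ f ih =>
    intro cur acc hf
    by_cases hcl : cur < lastId
    · have hstep : PySem.List.pyRange cur lastId (s - 1)
          = cur :: PySem.List.pyRange (cur + (s - 1)) lastId (s - 1) :=
        pvRange_pos_cons (by omega) hcl
      have hcur : cur + (s - 1) = cur + s - 1 := by ring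
      rw [hstep, hcur]
      simp only [pvLoopA, if_pos hcl, List.filter_cons]
      by_cases hap : cur + s ≤ lastId
      · rw [if_pos hap, ih (cur + s - 1) (acc ++ [(cur, cur + s)]) (by omega)]
        simp [hap, List.append_assoc]
      · rw [if_neg hap, ih (cur + s - 1) acc (by omega)]
        simp [hap]
    · have hle : lastId ≤ cur := by omega
      rw [pvRange_pos_nil (by omega) hle]
      simp [pvLoopA, if_neg hcl]

-- a negative numerator over a positive divisor floors below zero
theorem pvEdivNeg {a b : Int} (ha : a < 0) (hb : 0 < b) : a / b < 0 := by
  rcases lt_or_ge (a / b) 0 with h | h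
  · exact h
  · have h2 : (0 : Int) * b ≤ a := (Int.le_ediv_iff_mul_le hb).mp h
    rw [zero_mul] at h2
    omega

-- the filtered strided range equals B's closed-form indexed construction
theorem pvFilt_closed (s lastId : Int) (hs : 2 ≤ s) :
    ∀ (f : Nat) (cur : Int), (lastId - cur).toNat ≤ f →
      ((PySem.List.pyRange cur lastId (s - 1)).filter
          (fun c => decide (c + s ≤ lastId))).map (fun c => (c, c + s))
      = (List.range (PySem.Int.floordiv (lastId - s - cur) (s - 1) + 1).toNat).map
          (fun i : Nat => (cur + (i : Int) * (s - 1), cur + (i : Int) * (s - 1) + s)) := by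
  intro f
  induction f with
  | zero =>
    intro cur hf
    have hle : lastId ≤ cur := by omega
    have hneg : PySem.Int.floordiv (lastId - s - cur) (s - 1) < 0 := by
      rw [PySem.Int.floordiv_eq_ediv_of_pos (by omega)]
      exact pvEdivNeg (by omega) (by omega)
    rw [pvRange_pos_nil (by omega) hle]
    have : (PySem.Int.floordiv (lastId - s - cur) (s - 1) + 1).toNat = 0 := by omega
    simp [this]
  | succ f ih =>
    intro cur hf
    by_cases hcl : cur < lastId
    · have hstep : PySem.List.pyRange cur lastId (s - 1)
          = cur :: PySem.List.pyRange (cur + (s - 1)) lastId (s - 1) :=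
        pvRange_pos_cons (by omega) hcl
      rw [hstep]
      by_cases hap : cur + s ≤ lastId
      · -- M ≥ 0, and for cur' = cur + (s-1), M' = M - 1
        have hM0 : 0 ≤ PySem.Int.floordiv (lastId - s - cur) (s - 1) := by
          rw [PySem.Int.floordiv_eq_ediv_of_pos (by omega)]
          exact Int.ediv_nonneg (by omega) (by omega)
        have hM' : PySem.Int.floordiv (lastId - s - (cur + (s - 1))) (s - 1)
            = PySem.Int.floordiv (lastId - s - cur) (s - 1) - 1 := by
          rw [PySem.Int.floordiv_eq_ediv_of_pos (by omega),
              PySem.Int.floordiv_eq_ediv_of_pos (by omega)]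
          have h1 : lastId - s - (cur + (s - 1)) = (lastId - s - cur) + (-1) * (s - 1) := by ring
          rw [h1, Int.add_mul_ediv_right _ _ (by omega : (s - 1 : Int) ≠ 0)]
          ring
        rw [List.filter_cons, if_pos (by simpa using hap), List.map_cons,
            ih (cur + (s - 1)) (by omega), hM']
        have hT : (PySem.Int.floordiv (lastId - s - cur) (s - 1) + 1).toNat
            = (PySem.Int.floordiv (lastId - s - cur) (s - 1) - 1 + 1).toNat + 1 := by omega
        rw [hT, List.range_succ_eq_map, List.map_cons, List.map_map]
        congr 1
        · simp
        · exact List.map_congr_left (fun k _ => by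
            simp only [Function.comp_apply, Prod.mk.injEq]
            constructor <;> push_cast <;> ring)
      · -- candidate fails the test; both sides are the empty construction
        have hneg : ∀ c : Int, cur ≤ c →
            (PySem.Int.floordiv (lastId - s - c) (s - 1) + 1).toNat = 0 := by
          intro c hc
          have : PySem.Int.floordiv (lastId - s - c) (s - 1) < 0 := by
            rw [PySem.Int.floordiv_eq_ediv_of_pos (by omega)]
            exact pvEdivNeg (by omega) (by omega)
          omega
        rw [List.filter_cons, if_neg (by simpa using hap),
            ih (cur + (s - 1)) (by omega), hneg (cur + (s - 1)) (by omega),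
            hneg cur le_rfl]
        simp
    · have hle : lastId ≤ cur := by omega
      have : (PySem.Int.floordiv (lastId - s - cur) (s - 1) + 1).toNat = 0 := by
        have : PySem.Int.floordiv (lastId - s - cur) (s - 1) < 0 := by
          rw [PySem.Int.floordiv_eq_ediv_of_pos (by omega)]
          exact pvEdivNeg (by omega) (by omega)
        omega
      rw [pvRange_pos_nil (by omega) hle, this]
      simp

-- ===== VERDICT (by name: the statement is the Claim_ definition above) =====
theorem get_express_paths_py_spec : Claim_equal_get_express_paths_py := by
  intro n s _ hpre
  unfold Spec_get_express_paths_py get_express_paths_py get_express_paths_py_alt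
  by_cases hs : s < 2
  · have hn : n ≤ 1 := by rcases hpre with h | h <;> omega
    have hz : (n - 1).toNat = 0 := by omega
    rw [hz, if_pos hs]
    simp [pvLoopA]
  · rw [if_neg hs]
    rw [pvLoopA_eq s (n - 1) (by omega) (n - 1).toNat 0 [] (by omega),
        pvFilt_closed s (n - 1) (by omega) (n - 1).toNat 0 (by omega)]
    have h0 : n - 1 - s - 0 = n - 1 - s := by ring
    rw [h0, PySem.List.pyRange_one]
    simp only [List.nil_append, Int.sub_zero]
    rw [List.map_map]
    exact List.map_congr_left (fun k _ => by
      simp only [Function.comp_apply, Prod.mk.injEq]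
      constructor <;> ring)
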